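-- pv_equiv track=rewrite | github.com/Salome2010/IntroProgramacion | repaso.py | racha_mas_larga
-- ===== SOURCE A (Python) =====
-- def racha_mas_larga(tiempos:[int]) -> (int,int):
--     indiceIn:int = 0
--     indice:int = 0
--     longitud:int = 0
--     indiceMax:int = 0
--     longitudMax:int = 0
--     for i in range(len(tiempos)):
--         if 0<tiempos[i]<61:
--             if longitud == 0:
--                 indice = i
--             longitud+=1
--             if longitud>longitudMax:
--                 longitudMax = longitud
--                 indiceIn = indice
--                 indiceMax = i
--         else:
--             longitud = 0
--     return (indiceIn, indiceMax)
-- ===== SOURCE B (Python) =====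
-- def racha_mas_larga(tiempos):
--     # Collect all maximal runs of values in (0, 61) as (start, end, length),
--     # then pick the first longest run; (0, 0) if there is none.
--     runs = []
--     cur = None  # (start, last) of the run in progress
--     for i, x in enumerate(tiempos):
--         if 0 < x < 61:
--             cur = (i, i) if cur is None else (cur[0], i)
--         else:
--             if cur is not None:
--                 runs.append((cur[0], cur[1], cur[1] - cur[0] + 1))
--                 cur = None
--     if cur is not None:
--         runs.append((cur[0], cur[1], cur[1] - cur[0] + 1))
--     if not runs:
--         return (0, 0)
--     best = max(runs, key=lambda r: r[2])
--     return (best[0], best[1])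
-- ===== Notes on version B (the rewrite author's own statement) =====
-- stated objective: alternative
-- what changed: B first materialises all maximal in-range runs as (start,end,length) triples in one pass and then selects the first longest one with max(key=), instead of A's interleaved best-so-far bookkeeping over five counters inside the scan.
import Mathlib
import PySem

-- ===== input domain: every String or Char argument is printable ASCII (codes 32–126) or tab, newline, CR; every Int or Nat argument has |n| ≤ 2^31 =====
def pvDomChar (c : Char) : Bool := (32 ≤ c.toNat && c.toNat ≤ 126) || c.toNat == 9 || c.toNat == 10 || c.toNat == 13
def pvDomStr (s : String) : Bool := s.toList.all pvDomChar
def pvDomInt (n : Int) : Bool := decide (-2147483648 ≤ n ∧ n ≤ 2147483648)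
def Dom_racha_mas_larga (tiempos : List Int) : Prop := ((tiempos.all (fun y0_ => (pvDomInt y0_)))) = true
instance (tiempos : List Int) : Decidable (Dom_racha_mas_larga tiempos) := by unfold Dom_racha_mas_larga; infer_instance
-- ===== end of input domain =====

-- B collects all maximal in-range runs as (start,end,length) triples and then picks the
-- first longest with max(key=); A keeps a running best inside the scan. Same return values.

-- ===== PORT A =====
def rachaStepA (tiempos : List Int) (st : Int × Int × Int × Int × Int) (i : Int) :
    Int × Int × Int × Int × Int :=
  let (indiceIn, indice, longitud, indiceMax, longitudMax) := st
  let x := PySem.List.pyGetD tiempos i 0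
  if 0 < x ∧ x < 61 then
    let indice := if longitud = 0 then i else indice
    let longitud := longitud + 1
    if longitud > longitudMax then (indice, indice, longitud, i, longitud)
    else (indiceIn, indice, longitud, indiceMax, longitudMax)
  else (indiceIn, indice, 0, indiceMax, longitudMax)

def racha_mas_larga (tiempos : List Int) : Int × Int :=
  let st := (PySem.List.pyRange 0 tiempos.length 1).foldl (rachaStepA tiempos) (0, 0, 0, 0, 0)
  (st.1, st.2.2.2.1)

-- ===== PORT B =====
def rachaStepB (st : List (Int × Int × Int) × Option (Int × Int)) (p : Int × Int) :
    List (Int × Int × Int) × Option (Int × Int) :=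
  let (runs, cur) := st
  let (i, x) := p
  if 0 < x ∧ x < 61 then
    (runs, match cur with
           | none => some (i, i)
           | some (s, _) => some (s, i))
  else
    match cur with
    | none => (runs, none)
    | some (s, e) => (runs ++ [(s, e, e - s + 1)], none)

def racha_mas_larga_alt (tiempos : List Int) : Int × Int :=
  let st := (PySem.List.enumerate tiempos).foldl rachaStepB ([], none)
  let runs := match st.2 with
              | none => st.1
              | some (s, e) => st.1 ++ [(s, e, e - s + 1)]
  match PySem.List.max? runs (fun r => r.2.2) with
  | none => (0, 0)
  | some r => (r.1, r.2.1)

-- ===== PRECONDITION & SPEC =====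
def Spec_racha_mas_larga (tiempos : List Int) (out : Int × Int) : Prop := out = racha_mas_larga_alt tiempos
instance (tiempos : List Int) (out : Int × Int) : Decidable (Spec_racha_mas_larga tiempos out) := by unfold Spec_racha_mas_larga; infer_instance

-- ===== CLAIM (what is proved, stated in full; the proofs are below) =====
def Claim_equal_racha_mas_larga : Prop := ∀ (tiempos : List Int), Dom_racha_mas_larga tiempos → Spec_racha_mas_larga tiempos (racha_mas_larga tiempos)

-- ===== LEMMAS AND PROOFS =====

/-- A's step with the element passed alongside the index (used to bridge A's
    `pyRange`/`pyGetD` loop to a fold over `enumerate`). -/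
def rachaStepA' (st : Int × Int × Int × Int × Int) (p : Int × Int) :
    Int × Int × Int × Int × Int :=
  let (indiceIn, indice, longitud, indiceMax, longitudMax) := st
  let (i, x) := p
  if 0 < x ∧ x < 61 then
    let indice := if longitud = 0 then i else indice
    let longitud := longitud + 1
    if longitud > longitudMax then (indice, indice, longitud, i, longitud)
    else (indiceIn, indice, longitud, indiceMax, longitudMax)
  else (indiceIn, indice, 0, indiceMax, longitudMax)

/-- first-wins longest run, default (0,0,0) -/
def bestT (runs : List (Int × Int × Int)) : Int × Int × Int :=
  runs.foldl (fun b r => if r.2.2 > b.2.2 then r else b) (0, 0, 0)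

def closeCur (cur : Option (Int × Int)) : List (Int × Int × Int) :=
  match cur with
  | none => []
  | some (s, e) => [(s, e, e - s + 1)]

def RunInv (s : Int) (sA : Int × Int × Int × Int × Int)
    (sB : List (Int × Int × Int) × Option (Int × Int)) : Prop :=
  (∀ r ∈ sB.1, 1 ≤ r.2.2) ∧
  (match sB.2 with
   | none => sA.2.2.1 = 0
   | some (st, e) => sA.2.1 = st ∧ e = s - 1 ∧ sA.2.2.1 = e - st + 1 ∧ 1 ≤ sA.2.2.1) ∧
  (sA.1, sA.2.2.2.1, sA.2.2.2.2) = bestT (sB.1 ++ closeCur sB.2)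

lemma bestT_snoc (l : List (Int × Int × Int)) (r : Int × Int × Int) :
    bestT (l ++ [r]) = if r.2.2 > (bestT l).2.2 then r else bestT l := by
  simp [bestT, List.foldl_append]

lemma inv_step (s x : Int) (sA : Int × Int × Int × Int × Int)
    (sB : List (Int × Int × Int) × Option (Int × Int)) (h : RunInv s sA sB) :
    RunInv (s + 1) (rachaStepA' sA (s, x)) (rachaStepB sB (s, x)) := by
  obtain ⟨iIn, ind, lon, iMax, lonMax⟩ := sA
  obtain ⟨runs, cur⟩ := sB
  obtain ⟨h1, h2, h3⟩ := h
  have h1' : ∀ r ∈ runs, 1 ≤ r.2.2 := h1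
  by_cases hx : 0 < x ∧ x < 61
  · cases cur with
    | none =>
      have hlon0 : lon = 0 := h2
      have h3' : (iIn, iMax, lonMax) = bestT runs := by simpa [closeCur] using h3
      have eB : rachaStepB (runs, none) (s, x) = (runs, some (s, s)) := by
        simp [rachaStepB, hx]
      have eA : rachaStepA' (iIn, ind, lon, iMax, lonMax) (s, x)
          = if 1 > lonMax then (s, s, 1, s, 1) else (iIn, s, 1, iMax, lonMax) := by
        simp [rachaStepA', hx, hlon0]
      simp only [RunInv]
      rw [eA, eB]
      refine ⟨h1', ?_, ?_⟩
      · by_cases hgt : (1 : Int) > lonMax <;> simp [hgt]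
      · simp only [closeCur, bestT_snoc, ← h3']
        by_cases hgt : (1 : Int) > lonMax
        · simp [hgt]
        · simp [hgt]
    | some se =>
      obtain ⟨st, e⟩ := se
      obtain ⟨hind, he, hlon, hlon1⟩ := h2
      have hind : ind = st := hind
      have he : e = s - 1 := he
      have hlon : lon = e - st + 1 := hlon
      have hlon1 : 1 ≤ lon := hlon1
      have h3' : (iIn, iMax, lonMax)
          = if lon > (bestT runs).2.2 then (st, e, lon) else bestT runs := by
        have := h3
        simp only [closeCur, bestT_snoc] at this
        simpa [← hlon] using this
      have hne : ¬ lon = 0 := by omega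
      have eB : rachaStepB (runs, some (st, e)) (s, x) = (runs, some (st, s)) := by
        simp [rachaStepB, hx]
      have eA : rachaStepA' (iIn, ind, lon, iMax, lonMax) (s, x)
          = if lon + 1 > lonMax then (ind, ind, lon + 1, s, lon + 1)
            else (iIn, ind, lon + 1, iMax, lonMax) := by
        simp [rachaStepA', hx, hne]
      simp only [RunInv]
      rw [eA, eB]
      have hlen : s - st + 1 = lon + 1 := by omega
      by_cases hcase : lon > (bestT runs).2.2
      · rw [if_pos hcase] at h3'
        have e1 : iIn = st := congrArg Prod.fst h3'
        have e2 : iMax = e := congrArg (fun p => p.2.1) h3'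
        have e3 : lonMax = lon := congrArg (fun p => p.2.2) h3'
        have hgt : lon + 1 > lonMax := by omega
        refine ⟨h1', ?_, ?_⟩
        · simp [hgt, hind]; omega
        · simp only [closeCur, bestT_snoc, hlen]
          have hgt2 : ((st, s, lon + 1) : Int × Int × Int).2.2 > (bestT runs).2.2 := by
            simpa using by omega
          simp [hgt, hgt2, hind]
      · rw [if_neg hcase] at h3'
        have e3 : lonMax = (bestT runs).2.2 := congrArg (fun p => p.2.2) h3'
        by_cases hgt : lon + 1 > lonMax
        · refine ⟨h1', ?_, ?_⟩
          · simp [hgt, hind]; omega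
          · simp only [closeCur, bestT_snoc, hlen]
            have hgt2 : ((st, s, lon + 1) : Int × Int × Int).2.2 > (bestT runs).2.2 := by
              simpa using by omega
            simp [hgt, hgt2, hind]
        · refine ⟨h1', ?_, ?_⟩
          · simp [hgt, hind]; omega
          · simp only [closeCur, bestT_snoc, hlen]
            have hgt2 : ¬ ((st, s, lon + 1) : Int × Int × Int).2.2 > (bestT runs).2.2 := by
              simpa using by omega
            simp [hgt, hgt2, h3']
  · have eA : rachaStepA' (iIn, ind, lon, iMax, lonMax) (s, x)
        = (iIn, ind, 0, iMax, lonMax) := by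
      simp [rachaStepA', hx]
    cases cur with
    | none =>
      have h3' : (iIn, iMax, lonMax) = bestT runs := by simpa [closeCur] using h3
      have eB : rachaStepB (runs, none) (s, x) = (runs, none) := by
        simp [rachaStepB, hx]
      simp only [RunInv]
      rw [eA, eB]
      exact ⟨h1', rfl, by simpa [closeCur] using h3'⟩
    | some se =>
      obtain ⟨st, e⟩ := se
      obtain ⟨hind, he, hlon, hlon1⟩ := h2
      have hind : ind = st := hind
      have he : e = s - 1 := he
      have hlon : lon = e - st + 1 := hlon
      have hlon1 : 1 ≤ lon := hlon1
      have eB : rachaStepB (runs, some (st, e)) (s, x)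
          = (runs ++ [(st, e, e - st + 1)], none) := by
        simp [rachaStepB, hx]
      simp only [RunInv]
      rw [eA, eB]
      refine ⟨?_, rfl, ?_⟩
      · intro r hr
        rcases List.mem_append.mp hr with hr | hr
        · exact h1' r hr
        · simp at hr
          subst hr
          simpa using by omega
      · simpa [closeCur] using h3

lemma inv_fold (xs : List Int) : ∀ (s : Int) sA sB, RunInv s sA sB →
    RunInv (s + xs.length) ((PySem.List.enumerate xs s).foldl rachaStepA' sA)
      ((PySem.List.enumerate xs s).foldl rachaStepB sB) := by
  induction xs with
  | nil => intro s sA sB h; simpa [PySem.List.enumerate_nil] using h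
  | cons x xs ih =>
    intro s sA sB h
    rw [PySem.List.enumerate_cons]
    simp only [List.foldl_cons]
    have := ih (s + 1) (rachaStepA' sA (s, x)) (rachaStepB sB (s, x)) (inv_step s x sA sB h)
    have harith : s + 1 + (xs.length : Int) = s + ((x :: xs).length : Int) := by
      push_cast [List.length_cons]; ring
    rwa [harith] at this

lemma fold_some {T : Type} (f : Option T → T → Option T) (g : T → T → T)
    (hf : ∀ b x, f (some b) x = some (g b x)) (l : List T) :
    ∀ m : T, l.foldl f (some m) = some (l.foldl g m) := by
  induction l with
  | nil => intro m; rfl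
  | cons x l ih =>
    intro m
    rw [List.foldl_cons, hf, List.foldl_cons]
    exact ih _

lemma max?_eq_bestT (runs : List (Int × Int × Int)) (h1 : ∀ r ∈ runs, 1 ≤ r.2.2)
    (hne : runs ≠ []) :
    PySem.List.max? runs (fun r => r.2.2) = some (bestT runs) := by
  cases runs with
  | nil => exact absurd rfl hne
  | cons r l =>
    have hr : (1 : Int) ≤ r.2.2 := h1 r (List.mem_cons_self)
    have hb : bestT (r :: l) = l.foldl (fun b r => if r.2.2 > b.2.2 then r else b) r := by
      have hpos : r.2.2 > ((0 : Int), (0 : Int), (0 : Int)).2.2 := by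
        simpa using (by omega : (0 : Int) < r.2.2)
      simp only [bestT, List.foldl_cons, if_pos hpos]
    simp only [PySem.List.max?, List.foldl_cons]
    rw [hb]
    apply fold_some
    intro b x
    by_cases h : b.2.2 < x.2.2
    · simp only [if_pos h]
    · simp only [if_neg h]

lemma foldA_eq (tiempos : List Int) :
    (PySem.List.pyRange 0 tiempos.length 1).foldl (rachaStepA tiempos) (0, 0, 0, 0, 0)
      = (PySem.List.enumerate tiempos).foldl rachaStepA' (0, 0, 0, 0, 0) := by
  rw [PySem.List.enumerate_eq_map_pyRange (d := 0), List.foldl_map]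
  rfl

-- ===== VERDICT (by name: the statement is the Claim_ definition above) =====
theorem racha_mas_larga_spec : Claim_equal_racha_mas_larga := by
  intro tiempos _
  unfold Spec_racha_mas_larga racha_mas_larga racha_mas_larga_alt
  rw [foldA_eq]
  have hinv0 : RunInv 0 (0, 0, 0, 0, 0) ([], none) := by
    refine ⟨by simp, rfl, rfl⟩
  have hinv := inv_fold tiempos 0 (0, 0, 0, 0, 0) ([], none) hinv0
  set sA := (PySem.List.enumerate tiempos).foldl rachaStepA' (0, 0, 0, 0, 0) with hsA
  set sB := (PySem.List.enumerate tiempos).foldl rachaStepB ([], none) with hsB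
  obtain ⟨h1, h2, h3⟩ := hinv
  have hruns : (match sB.2 with
                | none => sB.1
                | some (s, e) => sB.1 ++ [(s, e, e - s + 1)]) = sB.1 ++ closeCur sB.2 := by
    cases hc : sB.2 with
    | none => simp [closeCur]
    | some se => obtain ⟨s, e⟩ := se; simp [closeCur]
  simp only [hruns]
  have hall : ∀ r ∈ sB.1 ++ closeCur sB.2, 1 ≤ r.2.2 := by
    intro r hr
    rcases List.mem_append.mp hr with hr | hr
    · exact h1 r hr
    · cases hc : sB.2 with
      | none => rw [hc] at hr; simp [closeCur] at hr
      | some se =>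
        obtain ⟨s, e⟩ := se
        rw [hc] at hr
        simp [closeCur] at hr
        rw [hc] at h2
        obtain ⟨_, _, hlon, hlon1⟩ := h2
        subst hr
        simpa using by omega
  by_cases hempty : sB.1 ++ closeCur sB.2 = []
  · rw [hempty] at h3
    have hz : (sA.1, sA.2.2.2.1, sA.2.2.2.2) = ((0:Int), (0:Int), (0:Int)) := by
      rw [h3]; rfl
    rw [hempty]
    simp only [PySem.List.max?, List.foldl_nil]
    have e1 : sA.1 = 0 := congrArg Prod.fst hz
    have e2 : sA.2.2.2.1 = 0 := congrArg (fun p => p.2.1) hz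
    rw [e1, e2]
  · rw [max?_eq_bestT _ hall hempty, ← h3]
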